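-- pv_equiv track=rewrite | github.com/miliar/Code_Jam_Webscraper | Solutions_python/Problem_201/560.py | answer
-- ===== SOURCE A (Python) =====
-- def answer(n, k):
--     if k == 1:
--         mid = (n + 1) // 2
--         y = max(mid - 1, n - mid)
--         z = min(mid - 1, n - mid)
--         result = (y, z)
--     else:
--         # if n is odd and k is odd
--         if n & 1 == 1 and k & 1 == 1:
--             # last user on right
--             result = answer(n // 2, k // 2)
--         # if n is even and k is even
--         elif n & 1 == 0 and k & 1 == 0:
--             # last user on right
--             result = answer(n // 2, k // 2)
--         # if n is even and k is odd
--         elif n & 1 == 0 and k & 1 == 1: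
--             # last user on left
--             result = answer((n - 1) // 2, k // 2)
--         # if n is odd and k is even
--         elif n & 1 == 1 and k & 1 == 0:
--             # last user on left
--             result = answer(n // 2, k // 2)
--     return result
-- ===== SOURCE B (Python) =====
-- def answer(n, k):
--     while k != 1:
--         if n % 2 == 0 and k % 2 == 1:
--             n = (n - 1) // 2
--         else:
--             n = n // 2
--         k //= 2
--     mid = (n + 1) // 2
--     return (max(mid - 1, n - mid), min(mid - 1, n - mid))
-- ===== Notes on version B (the rewrite author's own statement) =====
-- stated objective: simpler
-- what changed: Replaced the four-branch tail recursion with an explicit while loop that updates (n, k) by parity (one branch for even-n/odd-k, one for the rest) and computes the seat pair once after the loop.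
import Mathlib
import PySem

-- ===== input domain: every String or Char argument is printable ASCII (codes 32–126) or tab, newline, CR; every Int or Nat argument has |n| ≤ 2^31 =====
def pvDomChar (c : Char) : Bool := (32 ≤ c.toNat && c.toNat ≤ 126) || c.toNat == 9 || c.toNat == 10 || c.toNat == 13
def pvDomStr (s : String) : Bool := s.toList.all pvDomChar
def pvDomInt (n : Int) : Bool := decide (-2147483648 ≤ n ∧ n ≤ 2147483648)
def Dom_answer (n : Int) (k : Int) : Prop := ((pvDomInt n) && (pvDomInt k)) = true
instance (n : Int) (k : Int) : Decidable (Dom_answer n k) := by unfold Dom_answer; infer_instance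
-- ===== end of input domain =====

-- B replaces A's four-branch tail recursion by a while loop over (n, k) with one parity branch; return value only.
-- ===== PORT A =====
-- fuel-based transliteration of A's recursion (Python recursion is infinite for k <= 0; Pre_ excludes those)
def answerGo : Nat -> Int -> Int -> Int × Int
  | 0, _, _ => (0, 0)
  | f+1, n, k =>
    if k = 1 then
      let mid := PySem.Int.floordiv (n + 1) 2
      (max (mid - 1) (n - mid), min (mid - 1) (n - mid))
    else if PySem.Int.mod n 2 = 1 ∧ PySem.Int.mod k 2 = 1 then
      answerGo f (PySem.Int.floordiv n 2) (PySem.Int.floordiv k 2)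
    else if PySem.Int.mod n 2 = 0 ∧ PySem.Int.mod k 2 = 0 then
      answerGo f (PySem.Int.floordiv n 2) (PySem.Int.floordiv k 2)
    else if PySem.Int.mod n 2 = 0 ∧ PySem.Int.mod k 2 = 1 then
      answerGo f (PySem.Int.floordiv (n - 1) 2) (PySem.Int.floordiv k 2)
    else -- n odd, k even (the remaining elif of A; always reached when the others fail)
      answerGo f (PySem.Int.floordiv n 2) (PySem.Int.floordiv k 2)

def answer (n : Int) (k : Int) : Int × Int := answerGo k.toNat n k

-- ===== PORT B =====
-- fuel-based transliteration of B's while loop (same fuel bound; loop is infinite for k <= 0)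
def altLoop : Nat -> Int -> Int -> Int × Int
  | 0, n, k => (n, k)
  | f+1, n, k =>
    if k ≠ 1 then
      let n' := if PySem.Int.mod n 2 = 0 ∧ PySem.Int.mod k 2 = 1
                then PySem.Int.floordiv (n - 1) 2 else PySem.Int.floordiv n 2
      altLoop f n' (PySem.Int.floordiv k 2)
    else (n, k)

def answer_alt (n : Int) (k : Int) : Int × Int :=
  let n' := (altLoop k.toNat n k).1
  let mid := PySem.Int.floordiv (n' + 1) 2
  (max (mid - 1) (n' - mid), min (mid - 1) (n' - mid))

-- ===== PRECONDITION & SPEC =====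
-- A recurses forever (RecursionError) when k <= 0; Pre_ admits exactly the inputs where A returns.
def Pre_answer (n : Int) (k : Int) : Prop := 1 ≤ k
instance (n : Int) (k : Int) : Decidable (Pre_answer n k) := by unfold Pre_answer; infer_instance
def pvWitness_answer : Int × Int := (7, 3)
def Spec_answer (n : Int) (k : Int) (out : Int × Int) : Prop := out = answer_alt n k
instance (n : Int) (k : Int) (out : Int × Int) : Decidable (Spec_answer n k out) := by unfold Spec_answer; infer_instance

-- ===== CLAIM (what is proved, stated in full; the proofs are below) =====
def Claim_equal_answer : Prop := ∀ (n : Int) (k : Int), Dom_answer n k → Pre_answer n k → Spec_answer n k (answer n k)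

-- ===== LEMMAS AND PROOFS =====

theorem go_eq_loop (f : Nat) : ∀ (n k : Int), 1 ≤ k → k.toNat ≤ f →
    answerGo f n k =
      (let n' := (altLoop f n k).1
       let mid := PySem.Int.floordiv (n' + 1) 2
       (max (mid - 1) (n' - mid), min (mid - 1) (n' - mid))) := by
  induction f with
  | zero => intro n k hk hf; omega
  | succ f ih =>
    intro n k hk hf
    by_cases h1 : k = 1
    · subst h1; simp [answerGo, altLoop]
    · have hk2 : 2 ≤ k := by omega
      have hstep : PySem.Int.floordiv k 2 = k / 2 :=
        PySem.Int.floordiv_eq_ediv_of_pos (by omega)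
      have hdn : PySem.Int.floordiv n 2 = n / 2 :=
        PySem.Int.floordiv_eq_ediv_of_pos (by omega)
      have hdn1 : PySem.Int.floordiv (n - 1) 2 = (n - 1) / 2 :=
        PySem.Int.floordiv_eq_ediv_of_pos (by omega)
      have hmodn : PySem.Int.mod n 2 = n % 2 :=
        PySem.Int.mod_eq_emod_of_pos (by omega)
      have hmodk : PySem.Int.mod k 2 = k % 2 :=
        PySem.Int.mod_eq_emod_of_pos (by omega)
      have hk' : 1 ≤ k / 2 := by omega
      have hfit : (k / 2).toNat ≤ f := by omega
      have ih' := fun m => ih m (k / 2) hk' hfit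
      simp only [answerGo, altLoop, hmodn, hmodk, hstep, hdn, hdn1]
      split_ifs <;> first | omega | simpa using ih' _

-- ===== VERDICT (by name: the statement is the Claim_ definition above) =====
theorem answer_spec : Claim_equal_answer := by
  intro n k _ hk
  unfold Spec_answer answer answer_alt
  exact go_eq_loop k.toNat n k hk (le_refl _)
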